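-- pv_equiv track=rewrite | github.com/daniel-reich/ubiquitous-fiesta | sARz4TDdxCuqK6pja_15.py | deadly_virus
-- ===== SOURCE A (Python) =====
-- def deadly_virus(persons, n):
--   for i in range(n):
--     temp = [[x for x in y] for y in persons]
--     for x in range(len(temp)):
--       for y in range(len(temp[x])):
--         if x>0 and persons[x-1][y]=='V':
--           temp[x][y]='V'
--         if x<len(persons)-1 and persons[x+1][y]=='V':
--           temp[x][y]='V'
--         if y>0 and persons[x][y-1]=='V':
--           temp[x][y]='V'
--         if y<len(persons[x])-1 and persons[x][y+1]=='V':
--           temp[x][y]='V'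
--     persons=temp
--   return persons
-- ===== SOURCE B (Python) =====
-- def deadly_virus(persons, n):
--     viruses = [(i, j) for i, row in enumerate(persons)
--                for j, v in enumerate(row) if v == 'V']
--     return [['V' if any(abs(i - a) + abs(j - b) <= n for a, b in viruses) else v
--              for j, v in enumerate(row)]
--             for i, row in enumerate(persons)]
-- ===== Notes on version B (the rewrite author's own statement) =====
-- stated objective: faster
-- what changed: Replaces the n-round cellular simulation (copying the whole grid each round) by a closed-form distance test: a cell is 'V' iff some original virus cell is within Manhattan distance n, computed in one pass over the grid.
import Mathlib
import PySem

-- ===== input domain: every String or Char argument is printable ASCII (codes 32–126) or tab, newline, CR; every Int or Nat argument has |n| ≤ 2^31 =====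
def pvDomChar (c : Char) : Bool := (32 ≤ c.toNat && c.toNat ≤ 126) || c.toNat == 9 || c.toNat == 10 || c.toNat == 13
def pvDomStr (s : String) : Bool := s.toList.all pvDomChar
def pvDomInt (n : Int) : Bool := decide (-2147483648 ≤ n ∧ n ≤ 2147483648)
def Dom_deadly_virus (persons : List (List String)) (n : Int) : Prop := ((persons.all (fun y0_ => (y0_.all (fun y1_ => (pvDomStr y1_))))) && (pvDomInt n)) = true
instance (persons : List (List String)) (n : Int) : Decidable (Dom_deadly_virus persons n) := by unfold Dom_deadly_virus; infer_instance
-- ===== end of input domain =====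

-- B replaces A's n-round whole-grid simulation by a one-pass closed-form test
-- (cell is 'V' iff some original virus cell is within Manhattan distance n); equal return values on Pre_.

-- ===== PORT A =====
-- Python loop indices here are the non-negative `range(len(..))`, ported as `List.range`;
-- an out-of-range neighbour read (Python: IndexError, excluded by Pre_) is ported as getD with default "".
def pvSet2 (t : List (List String)) (x y : Nat) (v : String) : List (List String) :=
  t.set x ((t.getD x []).set y v)

def pvCell (persons t : List (List String)) (x y : Nat) : List (List String) :=
  let t1 := if 0 < x ∧ (persons.getD (x-1) []).getD y "" = "V" then pvSet2 t x y "V" else t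
  let t2 := if x < persons.length - 1 ∧ (persons.getD (x+1) []).getD y "" = "V" then pvSet2 t1 x y "V" else t1
  let t3 := if 0 < y ∧ (persons.getD x []).getD (y-1) "" = "V" then pvSet2 t2 x y "V" else t2
  let t4 := if y < (persons.getD x []).length - 1 ∧ (persons.getD x []).getD (y+1) "" = "V" then pvSet2 t3 x y "V" else t3
  t4

def pvStepA (persons : List (List String)) : List (List String) :=
  let temp := persons.map (fun yrow => yrow.map (fun c => c))
  (List.range temp.length).foldl (fun t x =>
    (List.range ((t.getD x []).length)).foldl (fun t y => pvCell persons t x y) t) temp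

def deadly_virus (persons : List (List String)) (n : Int) : List (List String) :=
  (PySem.List.pyRange 0 n 1).foldl (fun g _ => pvStepA g) persons

-- ===== PORT B =====
def pvViruses (persons : List (List String)) : List (Int × Int) :=
  (PySem.List.enumerate persons 0).flatMap (fun p =>
    ((PySem.List.enumerate p.2 0).filter (fun q => q.2 == "V")).map (fun q => (p.1, q.1)))

def deadly_virus_alt (persons : List (List String)) (n : Int) : List (List String) :=
  let viruses := pvViruses persons
  (PySem.List.enumerate persons 0).map (fun p =>
    (PySem.List.enumerate p.2 0).map (fun q =>
      if viruses.any (fun ab => decide ((((p.1 - ab.1).natAbs + (q.1 - ab.2).natAbs : Nat) : Int) ≤ n)) then "V" else q.2))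

-- ===== PRECONDITION & SPEC =====
-- Pre_ excludes exactly the inputs where A raises IndexError: ragged grids (two adjacent
-- rows of different lengths) together with at least one simulation round (n ≥ 1).
def Pre_deadly_virus (persons : List (List String)) (n : Int) : Prop :=
  n ≤ 0 ∨ List.IsChain (fun r s : List String => r.length = s.length) persons
instance (persons : List (List String)) (n : Int) : Decidable (Pre_deadly_virus persons n) := by
  unfold Pre_deadly_virus; infer_instance

def pvWitness_deadly_virus : List (List String) × Int := ([["P", "V"], ["P", "P"]], 2)

def Spec_deadly_virus (persons : List (List String)) (n : Int) (out : List (List String)) : Prop := out = deadly_virus_alt persons n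
instance (persons : List (List String)) (n : Int) (out : List (List String)) : Decidable (Spec_deadly_virus persons n out) := by unfold Spec_deadly_virus; infer_instance

-- ===== CLAIM (what is proved, stated in full; the proofs are below) =====
def Claim_equal_deadly_virus : Prop := ∀ (persons : List (List String)) (n : Int), Dom_deadly_virus persons n → Pre_deadly_virus persons n → Spec_deadly_virus persons n (deadly_virus persons n)

-- ===== LEMMAS AND PROOFS =====

-- Neighbour-is-virus condition of one simulation round, read off grid p at cell (x,y).
def nbVb (p : List (List String)) (x y : Nat) : Bool :=
  decide ((0 < x ∧ (p.getD (x-1) []).getD y "" = "V") ∨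
          (x < p.length - 1 ∧ (p.getD (x+1) []).getD y "" = "V") ∨
          (0 < y ∧ (p.getD x []).getD (y-1) "" = "V") ∨
          (y < (p.getD x []).length - 1 ∧ (p.getD x []).getD (y+1) "" = "V"))

def distN (x a : Nat) : Nat := (x - a) + (a - x)

-- "within distance k of some original virus cell", as a Bool over a finite search
def infB (p : List (List String)) (k x y : Nat) : Bool :=
  (List.range p.length).any fun a =>
    (List.range (p.getD a []).length).any fun b =>
      ((p.getD a []).getD b "" == "V") && decide (distN x a + distN y b ≤ k)

def Tgrid (p : List (List String)) (k : Nat) : List (List String) :=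
  p.mapIdx fun x row => row.mapIdx fun y v => if infB p k x y then "V" else v

def Rect (p : List (List String)) : Prop :=
  ∀ i, i < p.length → (p.getD i []).length = (p.getD 0 []).length

def newRow (p : List (List String)) (x : Nat) (row : List String) : List String :=
  row.mapIdx fun y v => if nbVb p x y then "V" else v

def procRow (p : List (List String)) (x : Nat) (row : List String) (j : Nat) : List String :=
  row.mapIdx fun y v => if y < j ∧ nbVb p x y then "V" else v

-- generic two-level grid lemmas ---------------------------------------------

lemma gridMap_rowlen (q : List (List String)) (f : Nat → Nat → String → String)
    (x : Nat) (hx : x < q.length) :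
    ((q.mapIdx fun i row => row.mapIdx (f i)).getD x []).length = (q.getD x []).length := by
  simp only [List.getD_eq_getElem?_getD, List.getElem?_mapIdx,
    List.getElem?_eq_getElem hx, Option.map_some, Option.getD_some, List.length_mapIdx]

lemma gridMap_getD (q : List (List String)) (f : Nat → Nat → String → String)
    (x y : Nat) (hx : x < q.length) (hy : y < (q.getD x []).length) :
    ((q.mapIdx fun i row => row.mapIdx (f i)).getD x []).getD y ""
      = f x y ((q.getD x []).getD y "") := by
  have hy2 : y < q[x].length := by rwa [List.getD_eq_getElem q [] hx] at hy
  simp only [List.getD_eq_getElem?_getD, List.getElem?_mapIdx,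
    List.getElem?_eq_getElem hx, Option.map_some, Option.getD_some,
    List.getElem?_eq_getElem hy2]

lemma grid_ext' (g1 g2 : List (List String)) (hl : g1.length = g2.length)
    (hrow : ∀ i, i < g1.length → (g1.getD i []).length = (g2.getD i []).length)
    (hcell : ∀ i j, i < g1.length → j < (g1.getD i []).length →
      (g1.getD i []).getD j "" = (g2.getD i []).getD j "") : g1 = g2 := by
  apply List.ext_getElem hl
  intro i h1 h2
  have hrl := hrow i h1
  rw [List.getD_eq_getElem g1 [] h1, List.getD_eq_getElem g2 [] h2] at hrl
  apply List.ext_getElem hrl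
  intro j hj1 hj2
  have := hcell i j h1 (by rwa [List.getD_eq_getElem g1 [] h1])
  rwa [List.getD_eq_getElem g1 [] h1, List.getD_eq_getElem g2 [] h2,
       List.getD_eq_getElem _ _ hj1, List.getD_eq_getElem _ _ hj2] at this

-- Tgrid basic facts ----------------------------------------------------------

lemma Tgrid_len (p : List (List String)) (k : Nat) : (Tgrid p k).length = p.length := by
  simp [Tgrid]

lemma Tgrid_rowlen (p : List (List String)) (k x : Nat) (hx : x < p.length) :
    ((Tgrid p k).getD x []).length = (p.getD x []).length :=
  gridMap_rowlen p _ x hx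

lemma Tgrid_get (p : List (List String)) (k x y : Nat)
    (hx : x < p.length) (hy : y < (p.getD x []).length) :
    ((Tgrid p k).getD x []).getD y ""
      = if infB p k x y then "V" else (p.getD x []).getD y "" :=
  gridMap_getD p _ x y hx hy

lemma infB_iff (p : List (List String)) (k x y : Nat) :
    infB p k x y = true ↔
      ∃ a, a < p.length ∧ ∃ b, b < (p.getD a []).length ∧
        (p.getD a []).getD b "" = "V" ∧ distN x a + distN y b ≤ k := by
  simp [infB, List.any_eq_true, List.mem_range]

lemma virus_infB (p : List (List String)) (k a b : Nat) (ha : a < p.length)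
    (hb : b < (p.getD a []).length) (hv : (p.getD a []).getD b "" = "V") :
    infB p k a b = true := by
  rw [infB_iff]
  exact ⟨a, ha, b, hb, hv, by simp [distN]⟩

lemma TcellV (p : List (List String)) (k x' y' : Nat)
    (hx : x' < p.length) (hy : y' < (p.getD x' []).length) :
    (((Tgrid p k).getD x' []).getD y' "" = "V") ↔ infB p k x' y' = true := by
  rw [Tgrid_get p k x' y' hx hy]
  split_ifs with h
  · simp [h]
  · exact ⟨fun hv => absurd (virus_infB p k x' y' hx hy hv) h, fun h' => absurd h' h⟩

-- step characterisation ------------------------------------------------------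

lemma getD_set_self (t : List (List String)) (x : Nat) (r : List String)
    (hx : x < t.length) : (t.set x r).getD x [] = r := by
  rw [List.getD_eq_getElem _ _ (by simpa using hx), List.getElem_set_self]

lemma set_getD_self (t : List (List String)) (x : Nat) (hx : x < t.length) :
    t.set x (t.getD x []) = t := by
  apply List.ext_getElem?
  intro i
  by_cases h : x = i
  · subst h
    rw [List.getElem?_set, if_pos rfl, if_pos hx, List.getD_eq_getElem _ _ hx,
        List.getElem?_eq_getElem hx]
  · rw [List.getElem?_set, if_neg h]

lemma pvSet2_idem (t : List (List String)) (x y : Nat) :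
    pvSet2 (pvSet2 t x y "V") x y "V" = pvSet2 t x y "V" := by
  rcases Nat.lt_or_ge x t.length with h | h
  · simp only [pvSet2]
    rw [getD_set_self _ _ _ h, List.set_set, List.set_set]
  · have e1 : pvSet2 t x y "V" = t := by
      simp only [pvSet2]
      exact List.set_eq_of_length_le h
    rw [e1, e1]

lemma condSet_pair (c1 c2 : Prop) [Decidable c1] [Decidable c2]
    (t : List (List String)) (x y : Nat) :
    (if c2 then pvSet2 (if c1 then pvSet2 t x y "V" else t) x y "V"
     else (if c1 then pvSet2 t x y "V" else t))
      = if c1 ∨ c2 then pvSet2 t x y "V" else t := by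
  by_cases h1 : c1 <;> by_cases h2 : c2 <;> simp [h1, h2, pvSet2_idem]

lemma pvCell_eq (p t : List (List String)) (x y : Nat) :
    pvCell p t x y = if nbVb p x y then pvSet2 t x y "V" else t := by
  simp only [pvCell]
  rw [condSet_pair, condSet_pair, condSet_pair]
  simp only [nbVb, decide_eq_true_iff]

lemma mapIdx_idfun {α : Type} (l : List α) : (l.mapIdx fun _ v => v) = l := by
  induction l with
  | nil => simp
  | cons a l ih =>
    rw [List.mapIdx_cons]
    exact congrArg (List.cons a) ih

lemma procRow_zero (p : List (List String)) (x : Nat) (row : List String) :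
    procRow p x row 0 = row := by
  simp [procRow, mapIdx_idfun]

lemma procRow_succ_pos (p : List (List String)) (x j : Nat) (row : List String)
    (hc : nbVb p x j = true) (hj : j < row.length) :
    (procRow p x row j).set j "V" = procRow p x row (j+1) := by
  apply List.ext_getElem?
  intro i
  rw [List.getElem?_set]
  by_cases hij : j = i
  · subst hij
    simp only [procRow, List.length_mapIdx, hj, if_true, List.getElem?_mapIdx,
      List.getElem?_eq_getElem hj, Option.map_some]
    simp [hc]
  · simp only [hij, if_false, procRow, List.getElem?_mapIdx]
    cases h : row[i]? with
    | none => rfl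
    | some v =>
      simp only [Option.map_some, Option.some.injEq]
      have : (i < j ∧ nbVb p x i = true) ↔ (i < j + 1 ∧ nbVb p x i = true) := by
        constructor <;> rintro ⟨h', h''⟩ <;> exact ⟨by omega, h''⟩
      split_ifs with ha hb hb
      · rfl
      · exact absurd (this.mp ha) hb
      · exact absurd (this.mpr hb) ha
      · rfl

lemma procRow_succ_neg (p : List (List String)) (x j : Nat) (row : List String)
    (hc : nbVb p x j = false) :
    procRow p x row j = procRow p x row (j+1) := by
  simp only [procRow]
  apply List.ext_getElem (by simp)
  intro i h1 h2
  rw [List.getElem_mapIdx, List.getElem_mapIdx]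
  have hi : i < row.length := by simpa using h1
  by_cases hij : i = j
  · subst hij
    simp [hc]
  · have : (i < j ∧ nbVb p x i = true) ↔ (i < j + 1 ∧ nbVb p x i = true) := by
      constructor <;> rintro ⟨h', h''⟩ <;> exact ⟨by omega, h''⟩
    split_ifs with ha hb hb
    · rfl
    · exact absurd (this.mp ha) hb
    · exact absurd (this.mpr hb) ha
    · rfl

lemma inner_spec (p t : List (List String)) (x : Nat) (hx : x < t.length) :
    ∀ j, j ≤ (t.getD x []).length →
      (List.range j).foldl (fun t y => pvCell p t x y) t
        = t.set x (procRow p x (t.getD x []) j) := by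
  intro j
  induction j with
  | zero =>
    intro _
    simp only [List.range_zero, List.foldl_nil, procRow_zero]
    exact (set_getD_self t x hx).symm
  | succ j ih =>
    intro hj
    rw [List.range_succ, List.foldl_append, ih (by omega), List.foldl_cons,
        List.foldl_nil, pvCell_eq]
    have hjlen : j < (t.getD x []).length := by omega
    by_cases hc : nbVb p x j = true
    · rw [if_pos hc]
      simp only [pvSet2]
      rw [getD_set_self _ _ _ hx, List.set_set,
          procRow_succ_pos p x j _ hc (by simpa [procRow] using hjlen)]
    · rw [if_neg hc, procRow_succ_neg p x j _ (Bool.eq_false_iff.mpr hc)]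

lemma procRow_full (p : List (List String)) (x : Nat) (row : List String) :
    procRow p x row row.length = newRow p x row := by
  simp only [procRow, newRow]
  apply List.ext_getElem (by simp)
  intro i h1 h2
  rw [List.getElem_mapIdx, List.getElem_mapIdx]
  have hi : i < row.length := by simpa using h1
  simp [hi]

lemma outer_spec (p : List (List String)) :
    ∀ X, X ≤ p.length →
      (List.range X).foldl (fun t x =>
          (List.range ((t.getD x []).length)).foldl (fun t y => pvCell p t x y) t) p
        = p.mapIdx (fun i row => if i < X then newRow p i row else row) := by
  intro X
  induction X with
  | zero =>
    intro _
    simp [mapIdx_idfun]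
  | succ X ih =>
    intro hX
    rw [List.range_succ, List.foldl_append, ih (by omega), List.foldl_cons, List.foldl_nil]
    have hXp : X < p.length := by omega
    set S := p.mapIdx (fun i row => if i < X then newRow p i row else row) with hS
    have hSlen : S.length = p.length := by simp [hS]
    have hxS : X < S.length := by omega
    have hrow : S.getD X [] = p.getD X [] := by
      simp only [hS, List.getD_eq_getElem?_getD, List.getElem?_mapIdx,
        List.getElem?_eq_getElem hXp, Option.map_some, Option.getD_some]
      rw [if_neg (by omega)]
    rw [inner_spec p S X hxS ((S.getD X []).length) le_rfl, hrow, procRow_full]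
    apply List.ext_getElem?
    intro i
    rw [List.getElem?_set]
    by_cases hij : X = i
    · subst hij
      rw [if_pos rfl, if_pos hxS, List.getElem?_mapIdx, List.getElem?_eq_getElem hXp]
      simp only [Option.map_some, Option.some.injEq]
      rw [if_pos (by omega), List.getD_eq_getElem _ _ hXp]
    · rw [if_neg hij, hS, List.getElem?_mapIdx, List.getElem?_mapIdx]
      cases h : p[i]? with
      | none => rfl
      | some row =>
        simp only [Option.map_some, Option.some.injEq]
        have : (i < X) ↔ (i < X + 1) := by omega
        split_ifs with ha hb hb
        · rfl
        · exact absurd (this.mp ha) hb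
        · exact absurd (this.mpr hb) ha
        · rfl

lemma stepA_eq (p : List (List String)) :
    pvStepA p = p.mapIdx (fun x row => newRow p x row) := by
  have htemp : (p.map fun yrow => yrow.map fun c => c) = p := by
    simp [List.map_id']
  show (List.range (p.map fun yrow => yrow.map fun c => c).length).foldl _ _ = _
  rw [htemp]
  rw [outer_spec p p.length le_rfl]
  apply List.ext_getElem (by simp)
  intro i h1 h2
  rw [List.getElem_mapIdx, List.getElem_mapIdx, if_pos (by simpa using h2)]

-- the key geometric step -----------------------------------------------------

lemma infB_succ (p : List (List String)) (k x y : Nat)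
    (hx : x < p.length) (hy : y < (p.getD x []).length) :
    infB p (k+1) x y = true ↔
      infB p k x y = true ∨
      (0 < x ∧ infB p k (x-1) y = true) ∨
      (x < p.length - 1 ∧ infB p k (x+1) y = true) ∨
      (0 < y ∧ infB p k x (y-1) = true) ∨
      (y < (p.getD x []).length - 1 ∧ infB p k x (y+1) = true) := by
  constructor
  · intro h
    rw [infB_iff] at h
    obtain ⟨a, ha, b, hb, hv, hd⟩ := h
    by_cases hk : distN x a + distN y b ≤ k
    · exact Or.inl ((infB_iff p k x y).mpr ⟨a, ha, b, hb, hv, hk⟩)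
    · rcases Nat.lt_trichotomy a x with h' | h' | h'
      · refine Or.inr (Or.inl ⟨by omega, (infB_iff _ _ _ _).mpr ⟨a, ha, b, hb, hv, ?_⟩⟩)
        simp only [distN] at hd hk ⊢; omega
      · subst h'
        rcases Nat.lt_trichotomy b y with h'' | h'' | h''
        · refine Or.inr (Or.inr (Or.inr (Or.inl ⟨by omega,
            (infB_iff _ _ _ _).mpr ⟨a, ha, b, hb, hv, ?_⟩⟩)))
          simp only [distN] at hd hk ⊢; omega
        · subst h''
          exfalso
          simp only [distN] at hk
          omega
        · refine Or.inr (Or.inr (Or.inr (Or.inr ⟨by omega,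
            (infB_iff _ _ _ _).mpr ⟨a, ha, b, hb, hv, ?_⟩⟩)))
          simp only [distN] at hd hk ⊢; omega
      · refine Or.inr (Or.inr (Or.inl ⟨by omega,
          (infB_iff _ _ _ _).mpr ⟨a, ha, b, hb, hv, ?_⟩⟩))
        simp only [distN] at hd hk ⊢; omega
  · rintro (h | ⟨hg, h⟩ | ⟨hg, h⟩ | ⟨hg, h⟩ | ⟨hg, h⟩) <;>
      rw [infB_iff] at h ⊢ <;>
      obtain ⟨a, ha, b, hb, hv, hd⟩ := h <;>
      refine ⟨a, ha, b, hb, hv, ?_⟩ <;>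
      simp only [distN] at hd ⊢ <;> omega

lemma nbVb_T (p : List (List String)) (hre : Rect p) (k x y : Nat)
    (hx : x < p.length) (hy : y < (p.getD x []).length) :
    nbVb (Tgrid p k) x y = true ↔
      (0 < x ∧ infB p k (x-1) y = true) ∨
      (x < p.length - 1 ∧ infB p k (x+1) y = true) ∨
      (0 < y ∧ infB p k x (y-1) = true) ∨
      (y < (p.getD x []).length - 1 ∧ infB p k x (y+1) = true) := by
  have hlen0 := hre x hx
  simp only [nbVb, decide_eq_true_iff, Tgrid_len, Tgrid_rowlen p k x hx]
  constructor
  · rintro (⟨hg, hv⟩ | ⟨hg, hv⟩ | ⟨hg, hv⟩ | ⟨hg, hv⟩)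
    · have hx' : x - 1 < p.length := by omega
      have hy' : y < (p.getD (x-1) []).length := by
        rw [hre (x-1) hx']; omega
      exact Or.inl ⟨hg, (TcellV p k (x-1) y hx' hy').mp hv⟩
    · have hx' : x + 1 < p.length := by omega
      have hy' : y < (p.getD (x+1) []).length := by
        rw [hre (x+1) hx']; omega
      exact Or.inr (Or.inl ⟨hg, (TcellV p k (x+1) y hx' hy').mp hv⟩)
    · exact Or.inr (Or.inr (Or.inl ⟨hg, (TcellV p k x (y-1) hx (by omega)).mp hv⟩))
    · exact Or.inr (Or.inr (Or.inr ⟨hg, (TcellV p k x (y+1) hx (by omega)).mp hv⟩))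
  · rintro (⟨hg, hv⟩ | ⟨hg, hv⟩ | ⟨hg, hv⟩ | ⟨hg, hv⟩)
    · have hx' : x - 1 < p.length := by omega
      have hy' : y < (p.getD (x-1) []).length := by
        rw [hre (x-1) hx']; omega
      exact Or.inl ⟨hg, (TcellV p k (x-1) y hx' hy').mpr hv⟩
    · have hx' : x + 1 < p.length := by omega
      have hy' : y < (p.getD (x+1) []).length := by
        rw [hre (x+1) hx']; omega
      exact Or.inr (Or.inl ⟨hg, (TcellV p k (x+1) y hx' hy').mpr hv⟩)
    · exact Or.inr (Or.inr (Or.inl ⟨hg, (TcellV p k x (y-1) hx (by omega)).mpr hv⟩))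
    · exact Or.inr (Or.inr (Or.inr ⟨hg, (TcellV p k x (y+1) hx (by omega)).mpr hv⟩))

lemma Tgrid_zero (p : List (List String)) : Tgrid p 0 = p := by
  apply grid_ext' _ _ (Tgrid_len p 0) (fun i hi => Tgrid_rowlen p 0 i (by simpa [Tgrid_len] using hi))
  intro i j hi hj
  have hip : i < p.length := by simpa [Tgrid_len] using hi
  have hjp : j < (p.getD i []).length := by rwa [Tgrid_rowlen p 0 i hip] at hj
  rw [Tgrid_get p 0 i j hip hjp]
  split_ifs with h
  · rw [infB_iff] at h
    obtain ⟨a, ha, b, hb, hv, hd⟩ := h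
    have hax : a = i ∧ b = j := by simp only [distN] at hd; omega
    rw [← hax.1, ← hax.2, hv]
  · rfl

lemma iter_eq (p : List (List String)) (hre : Rect p) :
    ∀ k, pvStepA^[k] p = Tgrid p k := by
  intro k
  induction k with
  | zero => simp [Tgrid_zero]
  | succ k ih =>
    rw [Function.iterate_succ_apply', ih, stepA_eq]
    apply grid_ext' _ _ (by simp [Tgrid_len]) ?hrow ?hcell
    case hrow =>
      intro i hi
      have hip : i < p.length := by simpa [Tgrid_len] using hi
      rw [show (fun x row => newRow (Tgrid p k) x row) = (fun x row => List.mapIdx (fun y v => if nbVb (Tgrid p k) x y then "V" else v) row) from rfl]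
      rw [gridMap_rowlen (Tgrid p k) _ i (by simpa [Tgrid_len] using hip),
          Tgrid_rowlen p k i hip, Tgrid_rowlen p (k+1) i hip]
    case hcell =>
      intro i j hi hj
      have hip : i < p.length := by simpa [Tgrid_len] using hi
      have hiT : i < (Tgrid p k).length := by simpa [Tgrid_len] using hip
      have hjp : j < (p.getD i []).length := by
        rw [show ((List.mapIdx (fun x row => newRow (Tgrid p k) x row) (Tgrid p k)).getD i []).length = ((Tgrid p k).getD i []).length from gridMap_rowlen (Tgrid p k) _ i hiT] at hj
        rwa [Tgrid_rowlen p k i hip] at hj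
      have hjT : j < ((Tgrid p k).getD i []).length := by
        rwa [Tgrid_rowlen p k i hip]
      rw [show ((List.mapIdx (fun x row => newRow (Tgrid p k) x row) (Tgrid p k)).getD i []).getD j "" = (if nbVb (Tgrid p k) i j then "V" else ((Tgrid p k).getD i []).getD j "") from gridMap_getD (Tgrid p k) _ i j hiT hjT]
      rw [Tgrid_get p k i j hip hjp, Tgrid_get p (k+1) i j hip hjp]
      by_cases hS : infB p (k+1) i j = true
      · rw [if_pos hS]
        rcases (infB_succ p k i j hip hjp).mp hS with h | h
        · by_cases hnb : nbVb (Tgrid p k) i j = true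
          · rw [if_pos hnb]
          · rw [if_neg hnb, if_pos h]
        · rw [if_pos ((nbVb_T p hre k i j hip hjp).mpr h)]
      · have hnotk : ¬ infB p k i j = true := fun h =>
          hS ((infB_succ p k i j hip hjp).mpr (Or.inl h))
        have hnotnb : ¬ nbVb (Tgrid p k) i j = true := fun h =>
          hS ((infB_succ p k i j hip hjp).mpr (Or.inr ((nbVb_T p hre k i j hip hjp).mp h)))
        rw [if_neg hS, if_neg hnotnb, if_neg hnotk]

lemma foldl_const_step (l : List Int) (s : List (List String)) :
    l.foldl (fun g _ => pvStepA g) s = pvStepA^[l.length] s := by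
  induction l generalizing s with
  | nil => simp
  | cons a l ih => simp [List.foldl_cons, ih, Function.iterate_succ_apply]

-- the B side ------------------------------------------------------------------

def bcond (p : List (List String)) (n : Int) (x y : Nat) : Bool :=
  (pvViruses p).any (fun ab =>
    decide (((((x : Int) - ab.1).natAbs + ((y : Int) - ab.2).natAbs : Nat) : Int) ≤ n))

lemma alt_len (p : List (List String)) (n : Int) :
    (deadly_virus_alt p n).length = p.length := by
  simp [deadly_virus_alt, PySem.List.length_enumerate]

lemma alt_rowlen (p : List (List String)) (n : Int) (x : Nat) (hx : x < p.length) :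
    ((deadly_virus_alt p n).getD x []).length = (p.getD x []).length := by
  simp only [deadly_virus_alt, List.getD_eq_getElem?_getD, List.getElem?_map,
    PySem.List.getElem?_enumerate, List.getElem?_eq_getElem hx, Option.map_some,
    Option.getD_some, List.length_map, PySem.List.length_enumerate]

lemma alt_getD (p : List (List String)) (n : Int) (x y : Nat)
    (hx : x < p.length) (hy : y < (p.getD x []).length) :
    ((deadly_virus_alt p n).getD x []).getD y ""
      = if bcond p n x y then "V" else (p.getD x []).getD y "" := by
  have hy2 : y < p[x].length := by rwa [List.getD_eq_getElem p [] hx] at hy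
  simp only [deadly_virus_alt, bcond, List.getD_eq_getElem?_getD, List.getElem?_map,
    PySem.List.getElem?_enumerate, List.getElem?_eq_getElem hx, Option.map_some,
    Option.getD_some, List.getElem?_eq_getElem hy2, zero_add]

lemma mem_viruses (p : List (List String)) (ab : Int × Int) :
    ab ∈ pvViruses p ↔
      ∃ a, a < p.length ∧ ∃ b, b < (p.getD a []).length ∧
        (p.getD a []).getD b "" = "V" ∧ ab = ((a : Int), (b : Int)) := by
  simp only [pvViruses, List.mem_flatMap, List.mem_map, List.mem_filter,
    PySem.List.mem_enumerate_iff, beq_iff_eq]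
  constructor
  · rintro ⟨pr, ⟨a, ha, rfl⟩, q, ⟨⟨b, hb, rfl⟩, hv⟩, rfl⟩
    simp only at hb hv ⊢
    refine ⟨a, ha, b, ?_, ?_, by simp⟩
    · rwa [List.getD_eq_getElem _ _ ha]
    · rw [List.getD_eq_getElem _ _ ha, List.getD_eq_getElem _ _ (by simpa [List.getD_eq_getElem _ _ ha] using hb)]
      simpa using hv
  · rintro ⟨a, ha, b, hb, hv, rfl⟩
    have hb' : b < p[a].length := by rwa [List.getD_eq_getElem _ _ ha] at hb
    rw [List.getD_eq_getElem _ _ ha, List.getD_eq_getElem _ _ hb'] at hv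
    exact ⟨((0 : Int) + (a : Int), p[a]), ⟨a, ha, rfl⟩,
      ((0 : Int) + (b : Int), p[a][b]), ⟨⟨b, hb', rfl⟩, hv⟩, by simp⟩

lemma bcond_iff_infB (p : List (List String)) (n : Int) (hn : 0 ≤ n) (x y : Nat) :
    bcond p n x y = true ↔ infB p n.toNat x y = true := by
  simp only [bcond, List.any_eq_true, decide_eq_true_iff, infB_iff]
  constructor
  · rintro ⟨ab, hmem, hle⟩
    obtain ⟨a, ha, b, hb, hv, rfl⟩ := (mem_viruses p ab).mp hmem
    refine ⟨a, ha, b, hb, hv, ?_⟩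
    simp only [distN]
    omega
  · rintro ⟨a, ha, b, hb, hv, hd⟩
    refine ⟨((a : Int), (b : Int)), (mem_viruses p _).mpr ⟨a, ha, b, hb, hv, rfl⟩, ?_⟩
    simp only [distN] at hd
    omega

lemma alt_eq_T (p : List (List String)) (n : Int) (hn : 0 ≤ n) :
    deadly_virus_alt p n = Tgrid p n.toNat := by
  apply grid_ext' _ _ (by rw [alt_len, Tgrid_len])
  · intro i hi
    have hip : i < p.length := by rwa [alt_len] at hi
    rw [alt_rowlen p n i hip, Tgrid_rowlen p _ i hip]
  · intro i j hi hj
    have hip : i < p.length := by rwa [alt_len] at hi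
    have hjp : j < (p.getD i []).length := by rwa [alt_rowlen p n i hip] at hj
    rw [alt_getD p n i j hip hjp, Tgrid_get p _ i j hip hjp]
    by_cases h : bcond p n i j = true
    · rw [if_pos h, if_pos ((bcond_iff_infB p n hn i j).mp h)]
    · rw [if_neg h, if_neg (fun h' => h ((bcond_iff_infB p n hn i j).mpr h'))]

lemma alt_neg (p : List (List String)) (n : Int) (hn : n < 0) :
    deadly_virus_alt p n = p := by
  apply grid_ext' _ _ (alt_len p n)
  · intro i hi
    exact alt_rowlen p n i (by rwa [alt_len] at hi)
  · intro i j hi hj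
    have hip : i < p.length := by rwa [alt_len] at hi
    have hjp : j < (p.getD i []).length := by rwa [alt_rowlen p n i hip] at hj
    rw [alt_getD p n i j hip hjp, if_neg]
    simp only [bcond, List.any_eq_true, decide_eq_true_iff, not_exists]
    rintro ab ⟨_, hle⟩
    omega

lemma alt_nonpos (p : List (List String)) (n : Int) (hn : n ≤ 0) :
    deadly_virus_alt p n = p := by
  rcases lt_or_eq_of_le hn with h | h
  · exact alt_neg p n h
  · rw [alt_eq_T p n (by omega)]
    have : n.toNat = 0 := by omega
    rw [this, Tgrid_zero]

lemma chain_rect (p : List (List String))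
    (h : List.IsChain (fun r s : List String => r.length = s.length) p) : Rect p := by
  rw [List.isChain_iff_getElem] at h
  intro i hi
  induction i with
  | zero => rfl
  | succ i ih =>
    have hi' : i < p.length := by omega
    rw [List.getD_eq_getElem _ _ hi, ← h i (by omega), ← List.getD_eq_getElem _ _ hi']
    exact ih hi'

-- ===== VERDICT (by name: the statement is the Claim_ definition above) =====
theorem deadly_virus_spec : Claim_equal_deadly_virus := by
  intro persons n _ hpre
  unfold Spec_deadly_virus deadly_virus
  rcases le_or_gt n 0 with hn | hn
  · rw [PySem.List.pyRange_one_eq_nil (by omega), List.foldl_nil, alt_nonpos persons n hn]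
  · have hch : List.IsChain (fun r s : List String => r.length = s.length) persons := by
      rcases hpre with h | h
      · omega
      · exact h
    have hre := chain_rect persons hch
    rw [foldl_const_step, PySem.List.length_pyRange_one]
    have h0 : ((n - 0).toNat) = n.toNat := by omega
    rw [h0, iter_eq persons hre n.toNat, alt_eq_T persons n (by omega)]
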